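-- pv_equiv track=rewrite | github.com/brechetp/double-descent | eval_meta.py | get_common_args
-- ===== SOURCE A (Python) =====
-- def get_common_args(args_arr):
--     '''returns the common set of arguments from an array of dictionnaries'''
--
--     keys = set(args_arr[0]).intersection(*[set(args) for args in args_arr])
--
--     ret = dict()
--     for k in keys:
--         for args in args_arr:
--             if args[k] != args_arr[0][k]:
--                 break
--         else:
--             ret[k] = args_arr[0][k]
--
--     return ret
-- ===== SOURCE B (Python) =====
-- def get_common_args(args_arr):
--     '''returns the common set of arguments from an array of dictionnaries'''
--
--     common = dict(args_arr[0])
--     for args in args_arr[1:]: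
--         common = {k: v for k, v in common.items() if k in args and args[k] == v}
--     return common
-- ===== Notes on version B (the rewrite author's own statement) =====
-- stated objective: simpler
-- what changed: B replaces A's two-phase scheme (intersect all key sets, then for each surviving key re-scan every dict) by an incremental-narrowing fold: it carries one shrinking candidate dict and filters it against each subsequent dict in turn, so each dict is visited once against an ever-smaller accumulator and no key is ever re-checked against all dicts.
import Mathlib
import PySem

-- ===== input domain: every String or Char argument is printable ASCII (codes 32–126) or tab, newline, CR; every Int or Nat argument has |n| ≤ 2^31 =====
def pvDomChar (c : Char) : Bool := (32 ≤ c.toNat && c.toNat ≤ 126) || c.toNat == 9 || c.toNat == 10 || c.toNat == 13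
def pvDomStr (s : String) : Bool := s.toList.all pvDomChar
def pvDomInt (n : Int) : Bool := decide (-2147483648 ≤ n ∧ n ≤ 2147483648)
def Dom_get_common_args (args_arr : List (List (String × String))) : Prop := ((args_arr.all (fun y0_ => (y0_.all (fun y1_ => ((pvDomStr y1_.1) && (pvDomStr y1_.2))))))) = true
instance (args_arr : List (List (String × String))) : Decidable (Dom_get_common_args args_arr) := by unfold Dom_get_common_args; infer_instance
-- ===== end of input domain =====

-- B replaces A's two-phase key-set-intersection-then-recheck scheme by an incremental-
-- narrowing fold over the dict list with one shrinking accumulator (objective: simpler).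

-- ===== PORT A =====
-- A: keys = intersection of all key sets, then for each common key keep it iff every
-- dict carries the first dict's value. (Python iterates the set `keys`; the dict OUTPUT
-- is compared ignoring order, and the Lean Set keeps first-insertion order.)
def get_common_args (args_arr : List (List (String × String))) : List (String × String) :=
  match args_arr with
  | [] => []  -- Python raises IndexError here; excluded by Pre_
  | first :: _ =>
    let keys : PySem.Set String :=
      args_arr.foldl (fun s args => PySem.Set.inter s (PySem.Set.ofList (args.map Prod.fst)))
        (PySem.Set.ofList (first.map Prod.fst))
    let ret : PySem.Dict String String :=
      keys.foldl (fun ret k =>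
        if args_arr.all (fun args => (PySem.Dict.mk args).get? k == (PySem.Dict.mk first).get? k)
        then ret.insert k ((PySem.Dict.mk first).getD k "")
        else ret) PySem.Dict.empty
    ret.items

-- ===== PORT B =====
-- B: start with a copy of the first dict and narrow it dict by dict: for each later
-- dict, keep only the accumulated pairs it contains with an equal value.
def get_common_args_alt (args_arr : List (List (String × String))) : List (String × String) :=
  match args_arr with
  | [] => []  -- Python raises IndexError here; excluded by Pre_
  | first :: rest =>
    rest.foldl (fun common args =>
      common.filter (fun kv =>
        (PySem.Dict.mk args).contains kv.1 && ((PySem.Dict.mk args).getD kv.1 "" == kv.2)))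
      first

-- ===== PRECONDITION & SPEC =====
-- Pre_ excludes the empty list (Python A raises IndexError on args_arr[0]) and inner
-- lists with duplicate keys, which do not represent any Python dict input.
def Pre_get_common_args (args_arr : List (List (String × String))) : Prop :=
  args_arr ≠ [] ∧ ∀ args ∈ args_arr, (args.map Prod.fst).Nodup
instance (args_arr : List (List (String × String))) : Decidable (Pre_get_common_args args_arr) := by unfold Pre_get_common_args; infer_instance

def pvWitness_get_common_args : (List (List (String × String))) := [[("lr", "0.1"), ("bs", "64")], [("lr", "0.1"), ("bs", "32")]]

def Spec_get_common_args (args_arr : List (List (String × String))) (out : List (String × String)) : Prop := out = get_common_args_alt args_arr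
instance (args_arr : List (List (String × String))) (out : List (String × String)) : Decidable (Spec_get_common_args args_arr out) := by unfold Spec_get_common_args; infer_instance

-- ===== CLAIM (what is proved, stated in full; the proofs are below) =====
def Claim_equal_get_common_args : Prop := ∀ (args_arr : List (List (String × String))), Dom_get_common_args args_arr → Pre_get_common_args args_arr → Spec_get_common_args args_arr (get_common_args args_arr)

-- ===== LEMMAS AND PROOFS =====

-- B's narrowing fold = one filter by the conjunction of all per-dict conditions
lemma foldl_filter_eq_filter_all (p : List (String × String) → String × String → Bool)
    (ls : List (List (String × String))) (l0 : List (String × String)) :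
    ls.foldl (fun acc args => acc.filter (p args)) l0
      = l0.filter (fun kv => ls.all (fun args => p args kv)) := by
  induction ls generalizing l0 with
  | nil => simp
  | cons l ls ih =>
    rw [List.foldl_cons, ih, List.filter_filter]
    refine List.filter_congr (fun kv _ => ?_)
    simp [List.all_cons, Bool.and_comm]

-- A's folding set-intersections = one filter by membership in every key list
lemma foldl_inter_eq_filter (s0 : List String) (ls : List (List (String × String))) :
    ls.foldl (fun s args => PySem.Set.inter s (PySem.Set.ofList (args.map Prod.fst))) s0
      = s0.filter (fun x => ls.all (fun args => (args.map Prod.fst).contains x)) := by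
  induction ls generalizing s0 with
  | nil => simp
  | cons l ls ih =>
    rw [List.foldl_cons, ih]
    simp only [PySem.Set.inter, List.filter_filter]
    refine List.filter_congr (fun x _ => ?_)
    simp only [List.all_cons, PySem.Set.contains, Bool.and_comm]
    congr 1
    simp [PySem.Set.mem_ofList]

-- A's folding conditional fresh inserts into a dict = filter + map
lemma foldl_insert_eq_filter_map (c : String → Bool) (v : String → String)
    (keys : List String) (d : PySem.Dict String String)
    (hnd : keys.Nodup) (hdisj : ∀ k ∈ keys, d.contains k = false) :
    (keys.foldl (fun ret k => if c k then ret.insert k (v k) else ret) d).items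
      = d.items ++ (keys.filter c).map (fun k => (k, v k)) := by
  induction keys generalizing d with
  | nil => simp
  | cons k ks ih =>
    have hk : d.contains k = false := hdisj k (by simp)
    by_cases hc : c k
    · have hitems := PySem.Dict.items_insert_of_not_contains d (v k) hk
      have hkeys := PySem.Dict.keys_insert_of_not_contains d (v k) hk
      have hstep : ∀ k' ∈ ks, (d.insert k (v k)).contains k' = false := by
        intro k' hk'
        have hne : k' ≠ k := fun h => (List.nodup_cons.mp hnd).1 (h ▸ hk')
        have := hdisj k' (by simp [hk'])
        simp [PySem.Dict.contains_eq_decide_mem_keys, hkeys] at this ⊢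
        exact ⟨this, hne⟩
      simp only [List.foldl_cons, hc, if_pos, List.filter_cons_of_pos hc, List.map_cons]
      rw [ih _ (List.nodup_cons.mp hnd).2 hstep, hitems]
      simp
    · rw [List.foldl_cons, if_neg hc, List.filter_cons_of_neg (by simpa using hc)]
      exact ih d (List.nodup_cons.mp hnd).2 (fun k' h => hdisj k' (by simp [h]))

-- Mathlib/PySem carry no lemma splitting `l.all (p && q)`; proved here (used twice below)
lemma all_and_eq {α : Type} (l : List α) (p q : α → Bool) :
    (l.all p && l.all q) = l.all (fun x => p x && q x) := by
  induction l with
  | nil => rfl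
  | cons a l ih => simp only [List.all_cons, ← ih]; by_cases hp : p a <;> by_cases hq : q a <;> simp [hp, hq]

lemma contains_mk_eq (args : List (String × String)) (k : String) :
    (PySem.Dict.mk args).contains k = (args.map Prod.fst).contains k := by
  simp [PySem.Dict.contains_eq_decide_mem_keys, PySem.Dict.keys_mk]

lemma get?_mk_self (first : List (String × String)) (kv : String × String)
    (h : (first.map Prod.fst).Nodup) (hm : kv ∈ first) :
    (PySem.Dict.mk first).get? kv.1 = some kv.2 :=
  PySem.Dict.get?_of_mem_items (PySem.Dict.mk first)
    (by simpa using hm) (by simpa [PySem.Dict.keys_mk] using h)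

-- the per-dict conditions of A and B coincide on a pair of the first dict
lemma cond_eq (args : List (String × String)) (kv : String × String) :
    ((PySem.Dict.mk args).contains kv.1 && ((PySem.Dict.mk args).getD kv.1 "" == kv.2))
      = ((PySem.Dict.mk args).get? kv.1 == some kv.2) := by
  rcases hq : (PySem.Dict.mk args).get? kv.1 with _ | w'
  · simp [PySem.Dict.contains_eq_isSome_get?, hq, PySem.Dict.getD_eq_get?_getD]
  · simp [PySem.Dict.contains_eq_isSome_get?, hq, PySem.Dict.getD_eq_get?_getD]

-- ===== VERDICT (by name: the statement is the Claim_ definition above) =====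
theorem get_common_args_spec : Claim_equal_get_common_args := by
  intro args_arr _ hpre
  obtain ⟨hne, hnd⟩ := hpre
  unfold Spec_get_common_args
  match args_arr with
  | [] => exact absurd rfl hne
  | first :: rest =>
    have hndf : (first.map Prod.fst).Nodup := hnd first (by simp)
    simp only [get_common_args, get_common_args_alt]
    -- collapse B's narrowing fold into one filter
    rw [foldl_filter_eq_filter_all]
    -- step 1: A's keys set
    rw [foldl_inter_eq_filter]
    have hself : PySem.Set.ofList (first.map Prod.fst) = first.map Prod.fst :=
      PySem.Set.ofList_eq_self_of_nodup _ hndf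
    rw [hself]
    -- step 2: A's dict-building fold
    rw [foldl_insert_eq_filter_map _ _ _ _ (hndf.filter _)
      (fun k _ => by simp [PySem.Dict.contains_eq_decide_mem_keys, PySem.Dict.keys_empty])]
    rw [show (PySem.Dict.empty : PySem.Dict String String).items = [] from rfl, List.nil_append,
      List.filter_filter, List.filter_map, List.map_map]
    -- step 3: pointwise comparison over the pairs of `first`
    refine (congrArg _ (List.filter_congr
        (q := fun kv => rest.all (fun args =>
          (PySem.Dict.mk args).contains kv.1 && ((PySem.Dict.mk args).getD kv.1 "" == kv.2)))
        (fun kv hm => ?_))).trans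
      ((List.map_congr_left (fun kv hm => ?_)).trans (List.map_id _))
    · have hget : (PySem.Dict.mk first).get? kv.1 = some kv.2 := get?_mk_self first kv hndf hm
      have hmemf : (first.map Prod.fst).contains kv.1 = true := by
        simp only [List.contains_iff_mem, List.mem_map]
        exact ⟨kv, hm, rfl⟩
      simp only [Function.comp, List.all_cons, hget, hmemf, beq_self_eq_true, Bool.true_and]
      rw [all_and_eq]
      refine congrArg rest.all (funext fun args => ?_)
      rw [cond_eq args kv, ← contains_mk_eq, PySem.Dict.contains_eq_isSome_get?]
      cases (PySem.Dict.mk args).get? kv.1 <;> simp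
    · have hget : (PySem.Dict.mk first).get? kv.1 = some kv.2 :=
        get?_mk_self first kv hndf (List.mem_filter.mp hm).1
      simp [PySem.Dict.getD_eq_get?_getD, hget]
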